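-- pv_equiv track=rewrite | github.com/acekyd/Speedy | exts/super_rare.py | get_reached
-- ===== SOURCE A (Python) =====
-- def get_reached(current_level: int, card: int, aimed_level: int) -> int:
--     """Check for cards, needed rings to get the aimed level."""
--
--     levels = [1, 2, 3, 4, 5, 6, 7, 8, 9, 10, 11, 12, 13, 14, 15, 16]
--     cards = [
--         0,
--         6,
--         8,
--         12,
--         20,
--         40,
--         60,
--         80,
--         100,
--         130,
--         160,
--         200,
--         240,
--         280,
--         330,
--         400,
--         0,
--     ]
--     rings = [
--         0,
--         400,
--         2500,
--         5000,
--         9000,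
--         16000,
--         24000,
--         32000,
--         50000,
--         70000,
--         85000,
--         100000,
--         130000,
--         160000,
--         200000,
--         240000,
--         0,
--     ]
--     exps = [
--         0,
--         40,
--         80,
--         120,
--         160,
--         200,
--         280,
--         360,
--         440,
--         520,
--         600,
--         680,
--         800,
--         960,
--         1120,
--         1280,
--         0,
--     ]
--
--     level = current_level
--     i = levels.index(
--         current_level + 1 if current_level == 0 else current_level
--     )
--     aimed_level_index = int(levels.index(aimed_level)) + 1
--     total_cards = 0 if level != 0 else 30
--     total_exps = 0
--     total_rings = 0
--
--     if level != 1: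
--         for i in range(i + 1, aimed_level_index):
--             total_cards += cards[i]
--             total_rings += rings[i]
--             total_exps += exps[i]
--     else:
--         for i in range(i, aimed_level_index):
--             total_cards += cards[i]
--             total_rings += rings[i]
--             total_exps += exps[i]
--
--     total_cards -= card
--
--     return total_cards, total_rings, total_exps
-- ===== SOURCE B (Python) =====
-- # B: prefix-sum table built once; each total is one subtraction instead of a loop.
--
-- _CARDS = [0, 6, 8, 12, 20, 40, 60, 80, 100, 130, 160, 200, 240, 280, 330, 400, 0]
-- _RINGS = [0, 400, 2500, 5000, 9000, 16000, 24000, 32000, 50000, 70000, 85000,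
--           100000, 130000, 160000, 200000, 240000, 0]
-- _EXPS = [0, 40, 80, 120, 160, 200, 280, 360, 440, 520, 600, 680, 800, 960, 1120, 1280, 0]
--
--
-- def _prefix(xs):
--     out = [0]
--     for x in xs:
--         out.append(out[-1] + x)
--     return out
--
--
-- _CARDS_P = _prefix(_CARDS)
-- _RINGS_P = _prefix(_RINGS)
-- _EXPS_P = _prefix(_EXPS)
--
--
-- def get_reached(current_level: int, card: int, aimed_level: int) -> int:
--     """Check for cards, needed rings to get the aimed level."""
--     start = 1 if current_level == 0 else (0 if current_level == 1 else current_level)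
--     end = max(aimed_level, start)
--     total_cards = _CARDS_P[end] - _CARDS_P[start]
--     total_rings = _RINGS_P[end] - _RINGS_P[start]
--     total_exps = _EXPS_P[end] - _EXPS_P[start]
--     if current_level == 0:
--         total_cards += 30
--     return total_cards - card, total_rings, total_exps
-- ===== Notes on version B (the rewrite author's own statement) =====
-- stated objective: simpler
-- what changed: Replaces A's index lookups and per-level summation loop over the three tables with prefix-sum arrays built once at module load, so each total is a single subtraction of two prefix values.
import Mathlib
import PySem

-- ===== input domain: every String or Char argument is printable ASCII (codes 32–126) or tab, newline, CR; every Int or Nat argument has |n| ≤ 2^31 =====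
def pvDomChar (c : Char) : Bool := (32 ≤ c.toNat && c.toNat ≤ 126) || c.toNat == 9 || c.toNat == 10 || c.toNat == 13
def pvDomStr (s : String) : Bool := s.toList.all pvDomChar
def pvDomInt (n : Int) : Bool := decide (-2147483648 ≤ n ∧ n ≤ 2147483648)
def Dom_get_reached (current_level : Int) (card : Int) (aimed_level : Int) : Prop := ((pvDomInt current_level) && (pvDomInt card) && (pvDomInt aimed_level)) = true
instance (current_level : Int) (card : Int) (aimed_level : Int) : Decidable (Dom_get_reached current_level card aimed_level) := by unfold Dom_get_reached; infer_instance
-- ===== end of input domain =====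

-- B replaces A's index lookups and summation loop with prefix-sum tables built once: simpler, O(1) per call.

-- ===== PORT A =====
-- the loop part of A: everything except the final 'total_cards -= card'
def pvLoopA (current_level : Int) (aimed_level : Int) : Int × Int × Int :=
  let levels : List Int := [1, 2, 3, 4, 5, 6, 7, 8, 9, 10, 11, 12, 13, 14, 15, 16]
  let cards : List Int := [0, 6, 8, 12, 20, 40, 60, 80, 100, 130, 160, 200, 240, 280, 330, 400, 0]
  let rings : List Int := [0, 400, 2500, 5000, 9000, 16000, 24000, 32000, 50000, 70000, 85000, 100000, 130000, 160000, 200000, 240000, 0]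
  let exps : List Int := [0, 40, 80, 120, 160, 200, 280, 360, 440, 520, 600, 680, 800, 960, 1120, 1280, 0]
  let level := current_level
  -- levels.index(...): Pre_ guarantees the element is present, so .getD 0 never fires
  let i : Int := ((PySem.List.index? levels (if current_level = 0 then current_level + 1 else current_level)).getD 0 : Nat)
  let aimed_level_index : Int := ((PySem.List.index? levels aimed_level).getD 0 : Nat) + 1
  let init : Int × Int × Int := ((if level ≠ 0 then 0 else 30), 0, 0)
  let rng := if level ≠ 1 then PySem.List.pyRange (i + 1) aimed_level_index 1
             else PySem.List.pyRange i aimed_level_index 1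
  rng.foldl (fun (s : Int × Int × Int) j =>
      (s.1 + PySem.List.pyGetD cards j 0,
       s.2.1 + PySem.List.pyGetD rings j 0,
       s.2.2 + PySem.List.pyGetD exps j 0)) init

def get_reached (current_level : Int) (card : Int) (aimed_level : Int) : Int × Int × Int :=
  let t := pvLoopA current_level aimed_level
  (t.1 - card, t.2.1, t.2.2)

-- ===== PORT B =====
-- _prefix(xs): running prefix sums, out[0] = 0
def pvPrefix (xs : List Int) : List Int :=
  xs.foldl (fun out x => out ++ [PySem.List.pyGetD out (-1) 0 + x]) [0]

def pvCardsP : List Int := pvPrefix [0, 6, 8, 12, 20, 40, 60, 80, 100, 130, 160, 200, 240, 280, 330, 400, 0]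
def pvRingsP : List Int := pvPrefix [0, 400, 2500, 5000, 9000, 16000, 24000, 32000, 50000, 70000, 85000, 100000, 130000, 160000, 200000, 240000, 0]
def pvExpsP : List Int := pvPrefix [0, 40, 80, 120, 160, 200, 280, 360, 440, 520, 600, 680, 800, 960, 1120, 1280, 0]

-- the prefix-difference part of B: everything except the final '- card'
def pvCoreB (current_level : Int) (aimed_level : Int) : Int × Int × Int :=
  let start : Int := if current_level = 0 then 1 else if current_level = 1 then 0 else current_level
  let e : Int := max aimed_level start
  let total_cards := PySem.List.pyGetD pvCardsP e 0 - PySem.List.pyGetD pvCardsP start 0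
  let total_rings := PySem.List.pyGetD pvRingsP e 0 - PySem.List.pyGetD pvRingsP start 0
  let total_exps := PySem.List.pyGetD pvExpsP e 0 - PySem.List.pyGetD pvExpsP start 0
  let total_cards := if current_level = 0 then total_cards + 30 else total_cards
  (total_cards, total_rings, total_exps)

def get_reached_alt (current_level : Int) (card : Int) (aimed_level : Int) : Int × Int × Int :=
  let t := pvCoreB current_level aimed_level
  (t.1 - card, t.2.1, t.2.2)

-- ===== PRECONDITION & SPEC =====
-- Pre_ excludes exactly the inputs where A raises ValueError (levels.index fails):
-- current_level must be 0 or in 1..16 and aimed_level in 1..16.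
def Pre_get_reached (current_level : Int) (card : Int) (aimed_level : Int) : Prop :=
  (current_level = 0 ∨ (1 ≤ current_level ∧ current_level ≤ 16)) ∧ 1 ≤ aimed_level ∧ aimed_level ≤ 16
instance (current_level : Int) (card : Int) (aimed_level : Int) : Decidable (Pre_get_reached current_level card aimed_level) := by unfold Pre_get_reached; infer_instance

def pvWitness_get_reached : Int × Int × Int := (2, 5, 9)

def Spec_get_reached (current_level : Int) (card : Int) (aimed_level : Int) (out : Int × Int × Int) : Prop := out = get_reached_alt current_level card aimed_level
instance (current_level : Int) (card : Int) (aimed_level : Int) (out : Int × Int × Int) : Decidable (Spec_get_reached current_level card aimed_level out) := by unfold Spec_get_reached; infer_instance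

-- ===== CLAIM (what is proved, stated in full; the proofs are below) =====
def Claim_equal_get_reached : Prop := ∀ (current_level : Int) (card : Int) (aimed_level : Int), Dom_get_reached current_level card aimed_level → Pre_get_reached current_level card aimed_level → Spec_get_reached current_level card aimed_level (get_reached current_level card aimed_level)

-- ===== LEMMAS AND PROOFS =====

-- the two cores agree on every admissible (current_level, aimed_level) pair
theorem pv_core_eq : ∀ cl ∈ Finset.Icc (0 : Int) 16, ∀ al ∈ Finset.Icc (1 : Int) 16,
    pvLoopA cl al = pvCoreB cl al := by decide

-- ===== VERDICT (by name: the statement is the Claim_ definition above) =====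
theorem get_reached_spec : Claim_equal_get_reached := by
  intro cl card al _ hpre
  have hcl : cl ∈ Finset.Icc (0 : Int) 16 := by
    rw [Finset.mem_Icc]; rcases hpre.1 with h | h <;> omega
  have hal : al ∈ Finset.Icc (1 : Int) 16 := by
    rw [Finset.mem_Icc]; exact hpre.2
  show get_reached cl card al = get_reached_alt cl card al
  simp only [get_reached, get_reached_alt, pv_core_eq cl hcl al hal]
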